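-- pv_equiv track=rewrite | github.com/eric-stover/GreatMigration | backend/compliance.py | _extract_port_number
-- ===== SOURCE A (Python) =====
-- from typing import Any, Dict, Iterable, List, Mapping, Optional, Sequence, Set, Tuple
--
-- def _extract_port_number(label: Optional[str]) -> Optional[int]:
--     if not label:
--         return None
--     digits = "".join(ch if ch.isdigit() else " " for ch in label)
--     try:
--         parts = [int(part) for part in digits.split() if part]
--     except ValueError:
--         return None
--     if not parts:
--         return None
--     # Assume the last numeric segment represents the port number
--     return parts[-1]
-- ===== SOURCE B (Python) =====
-- def _extract_port_number(label):
--     if not label: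
--         return None
--     i = len(label) - 1
--     while i >= 0 and not label[i].isdigit():
--         i -= 1
--     if i < 0:
--         return None
--     j = i
--     while j >= 0 and label[j].isdigit():
--         j -= 1
--     return int(label[j + 1:i + 1])
-- ===== Notes on version B (the rewrite author's own statement) =====
-- stated objective: alternative
-- what changed: Instead of masking every character, splitting the whole masked string and parsing every numeric segment, B scans once from the right end: it skips the trailing non-digits, collects the last run of digits, and converts only that run.
import Mathlib
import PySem

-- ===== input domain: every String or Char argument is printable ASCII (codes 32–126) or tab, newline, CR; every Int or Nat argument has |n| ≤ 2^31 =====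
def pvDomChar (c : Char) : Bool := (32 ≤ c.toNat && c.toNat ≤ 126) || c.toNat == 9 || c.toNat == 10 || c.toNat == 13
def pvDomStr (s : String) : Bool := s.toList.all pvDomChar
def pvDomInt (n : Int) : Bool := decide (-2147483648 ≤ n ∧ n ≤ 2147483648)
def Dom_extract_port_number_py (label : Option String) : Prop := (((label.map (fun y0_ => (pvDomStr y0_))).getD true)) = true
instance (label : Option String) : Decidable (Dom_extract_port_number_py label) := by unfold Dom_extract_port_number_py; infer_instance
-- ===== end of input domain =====

-- B replaces mask-split-parse-all with a single right-to-left scan that extracts only the trailing digit run (alternative decomposition, same worst-case cost).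


-- ===== PORT A =====
-- port of int(part): here int() is only ever applied to the nonempty all-ASCII-digit
-- pieces produced by digits.split(), where int() never raises (so A's try/except is dead)
-- and equals this decimal fold; exact in this context.
def pvDigitsVal (ds : List Char) : Int :=
  ds.foldl (fun n c => 10 * n + ((c.toNat : Int) - 48)) 0

def extract_port_number_py (label : Option String) : Option Int :=
  match label with
  | none => none
  | some s =>
    if s.toList.isEmpty then none   -- `if not label`
    else
      -- digits = "".join(ch if ch.isdigit() else " " for ch in label)
      let digits := s.toList.map (fun ch => if PySem.Chars.isdigit ch then ch else ' ')
      -- parts = [int(part) for part in digits.split() if part]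
      let parts := ((PySem.Chars.split₀ digits).filter (fun p => !p.isEmpty)).map pvDigitsVal
      if parts.isEmpty then none
      else PySem.List.pyGet? parts (-1)   -- return parts[-1]

-- ===== PORT B =====
-- first while loop of Source B: walk from the end over the reversed characters until a digit
def pvSkipNonDigits : List Char → List Char
  | [] => []
  | c :: rest => if PySem.Chars.isdigit c then c :: rest else pvSkipNonDigits rest

def extract_port_number_py_alt (label : Option String) : Option Int :=
  match label with
  | none => none
  | some s =>
    if s.toList.isEmpty then none   -- `if not label`
    else
      match pvSkipNonDigits s.toList.reverse with
      | [] => none                  -- `if i < 0: return None`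
      | c :: rest =>
        -- second while loop: collect the digits of the trailing run, then int(label[j+1:i+1])
        some (pvDigitsVal (((c :: rest).takeWhile PySem.Chars.isdigit).reverse))

-- ===== PRECONDITION & SPEC =====
def Spec_extract_port_number_py (label : Option String) (out : Option Int) : Prop := out = extract_port_number_py_alt label
instance (label : Option String) (out : Option Int) : Decidable (Spec_extract_port_number_py label out) := by unfold Spec_extract_port_number_py; infer_instance

-- ===== CLAIM (what is proved, stated in full; the proofs are below) =====
def Claim_equal_extract_port_number_py : Prop := ∀ (label : Option String), Dom_extract_port_number_py label → Spec_extract_port_number_py label (extract_port_number_py label)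

-- ===== LEMMAS AND PROOFS =====

theorem pv_isspace_of_isdigit (c : Char) (h : PySem.Chars.isdigit c = true) :
    PySem.Chars.isspace c = false := by
  simp only [PySem.Chars.isdigit, Bool.and_eq_true, decide_eq_true_eq] at h
  obtain ⟨h1, h2⟩ := h
  have n1 : 48 ≤ c.toNat := UInt32.le_iff_toNat_le.mp (Char.le_def.mp h1)
  have n2 : c.toNat ≤ 57 := UInt32.le_iff_toNat_le.mp (Char.le_def.mp h2)
  rw [Bool.eq_false_iff]
  intro hsp
  simp only [PySem.Chars.isspace, Bool.or_eq_true, Bool.and_eq_true, decide_eq_true_eq] at hsp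
  omega

theorem pv_isspace_space : PySem.Chars.isspace ' ' = true := by decide

-- the left-to-right state machine computing the LAST maximal digit run of cs, with
-- pending reversed run `cur` and best-so-far `best`
def pvLastAux : List Char → List Char → Option (List Char) → Option (List Char)
  | [], cur, best => if cur = [] then best else some cur.reverse
  | c :: rest, cur, best =>
      if PySem.Chars.isdigit c then pvLastAux rest (c :: cur) best
      else pvLastAux rest [] (if cur = [] then best else some cur.reverse)

theorem pv_go_last (cs cur acc) :
    (PySem.Chars.split₀.go (cs.map (fun c => if PySem.Chars.isdigit c then c else ' ')) cur acc).getLast?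
      = pvLastAux cs cur acc.head? := by
  induction cs generalizing cur acc with
  | nil =>
    simp only [List.map_nil, PySem.Chars.split₀.go, pvLastAux]
    by_cases h : cur = []
    · simp [h, List.getLast?_reverse]
    · simp [h, List.isEmpty_iff, List.getLast?_reverse]
  | cons c rest ih =>
    by_cases hd : PySem.Chars.isdigit c = true
    · have hs := pv_isspace_of_isdigit c hd
      simp only [List.map_cons, pvLastAux]
      simp [hd, hs, PySem.Chars.split₀.go]
      simpa using ih (c :: cur) acc
    · have hd' : PySem.Chars.isdigit c = false := by simpa using hd
      simp only [List.map_cons, pvLastAux]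
      simp [hd', pv_isspace_space, PySem.Chars.split₀.go]
      by_cases hc : cur = []
      · simp only [hc, List.isEmpty_nil, if_pos rfl]
        simpa using ih [] acc
      · rw [if_neg (by simpa [List.isEmpty_iff] using hc), if_neg hc]
        simpa using ih [] (cur.reverse :: acc)

theorem pv_go_ne_nil (s cur acc) (hacc : ∀ w ∈ acc, w ≠ ([] : List Char)) :
    ∀ w ∈ PySem.Chars.split₀.go s cur acc, w ≠ [] := by
  induction s generalizing cur acc with
  | nil =>
    intro w hw
    simp only [PySem.Chars.split₀.go] at hw
    by_cases h : cur = []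
    · simp [h] at hw; exact hacc w (by simpa using hw)
    · rw [if_neg (by simp [List.isEmpty_iff, h])] at hw
      simp only [List.mem_reverse, List.mem_cons] at hw
      rcases hw with hw | hw
      · subst hw; simpa using h
      · exact hacc w hw
  | cons c rest ih =>
    intro w hw
    simp only [PySem.Chars.split₀.go] at hw
    by_cases hs : PySem.Chars.isspace c = true
    · rw [if_pos hs] at hw
      by_cases hc : cur = []
      · rw [if_pos (by simp [hc])] at hw; exact ih [] acc hacc w hw
      · rw [if_neg (by simp [List.isEmpty_iff, hc])] at hw
        refine ih [] (cur.reverse :: acc) ?_ w hw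
        intro v hv
        rcases List.mem_cons.mp hv with hv | hv
        · subst hv; simpa using hc
        · exact hacc v hv
    · rw [if_neg hs] at hw; exact ih (c :: cur) acc hacc w hw

theorem pv_takeWhile_append_block {x : Char} (hx : PySem.Chars.isdigit x = false)
    (l₁ l₂ : List Char) :
    (l₁ ++ x :: l₂).takeWhile PySem.Chars.isdigit = l₁.takeWhile PySem.Chars.isdigit := by
  induction l₁ with
  | nil => simp [List.takeWhile, hx]
  | cons c l₁ ih =>
    simp only [List.cons_append, List.takeWhile]
    cases h : PySem.Chars.isdigit c <;> simp [ih]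

theorem pv_lastAux_append_nondigit {a : Char} (ha : PySem.Chars.isdigit a = false)
    (xs : List Char) (cur : List Char) (best : Option (List Char)) :
    pvLastAux (xs ++ [a]) cur best = pvLastAux xs cur best := by
  induction xs generalizing cur best with
  | nil => simp [pvLastAux, ha]
  | cons x xs ih =>
    simp only [List.cons_append, pvLastAux]
    cases h : PySem.Chars.isdigit x <;> simp [ih]

theorem pv_lastAux_append_digit {a : Char} (ha : PySem.Chars.isdigit a = true)
    (xs : List Char) (cur : List Char) (best : Option (List Char))
    (hcur : ∀ c ∈ cur, PySem.Chars.isdigit c = true) :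
    pvLastAux (xs ++ [a]) cur best
      = some (((cur.reverse ++ xs).reverse.takeWhile PySem.Chars.isdigit).reverse ++ [a]) := by
  induction xs generalizing cur best with
  | nil =>
    simp only [List.nil_append, pvLastAux, ha, if_pos rfl, List.append_nil, List.reverse_reverse]
    rw [List.takeWhile_eq_self_iff.mpr (by intro c hc; exact hcur c hc)]
    simp [pvLastAux]
  | cons x xs ih =>
    simp only [List.cons_append, pvLastAux]
    cases h : PySem.Chars.isdigit x with
    | true =>
      rw [if_pos rfl]
      have hcur' : ∀ c ∈ x :: cur, PySem.Chars.isdigit c = true := by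
        intro c hc
        rcases List.mem_cons.mp hc with hc | hc
        · subst hc; exact h
        · exact hcur c hc
      rw [ih (x :: cur) best hcur']
      simp
    | false =>
      rw [if_neg (by simp)]
      rw [ih [] _ (by intro c hc; simp at hc)]
      simp only [List.reverse_append, List.reverse_cons, List.reverse_reverse,
        List.append_assoc, List.singleton_append, List.reverse_nil, List.nil_append]
      rw [pv_takeWhile_append_block h xs.reverse cur]

theorem pv_lastAux_eq_skip (rs : List Char) :
    pvLastAux rs.reverse [] none
      = (match pvSkipNonDigits rs with
         | [] => none
         | c :: rest => some (((c :: rest).takeWhile PySem.Chars.isdigit).reverse)) := by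
  induction rs with
  | nil => simp [pvLastAux, pvSkipNonDigits]
  | cons a rs ih =>
    simp only [List.reverse_cons, pvSkipNonDigits]
    cases ha : PySem.Chars.isdigit a with
    | true =>
      rw [pv_lastAux_append_digit ha rs.reverse [] none (by intro c hc; simp at hc)]
      simp [List.takeWhile, ha]
    | false =>
      rw [pv_lastAux_append_nondigit ha, ih]
      simp

theorem pv_filter_split₀ (m : List Char) :
    (PySem.Chars.split₀ m).filter (fun p => !p.isEmpty) = PySem.Chars.split₀ m := by
  apply List.filter_eq_self.mpr
  intro w hw
  have := pv_go_ne_nil m [] [] (by intro v hv; simp at hv) w hw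
  simpa [List.isEmpty_iff] using this

-- ===== VERDICT (by name: the statement is the Claim_ definition above) =====
theorem pv_last_of_parts (l : List (List Char)) :
    (if (l.map pvDigitsVal).isEmpty then none else PySem.List.pyGet? (l.map pvDigitsVal) (-1))
      = l.getLast?.map pvDigitsVal := by
  cases l with
  | nil => rfl
  | cons y ys =>
    rw [if_neg (by simp)]
    rw [PySem.List.pyGet?_neg_one, List.getLast?_map]

theorem extract_port_number_py_spec : Claim_equal_extract_port_number_py := by
  intro label _
  unfold Spec_extract_port_number_py extract_port_number_py extract_port_number_py_alt
  match label with
  | none => rfl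
  | some s =>
    by_cases he : s.toList.isEmpty
    · simp [he]
    · simp only [he, Bool.false_eq_true, if_false]
      rw [pv_filter_split₀, pv_last_of_parts]
      have hLlast : (PySem.Chars.split₀
          (s.toList.map (fun ch => if PySem.Chars.isdigit ch then ch else ' '))).getLast?
          = pvLastAux s.toList [] none := by
        simpa [PySem.Chars.split₀] using pv_go_last s.toList [] []
      have hskip := pv_lastAux_eq_skip s.toList.reverse
      rw [List.reverse_reverse] at hskip
      rw [hLlast, hskip]
      cases hsk : pvSkipNonDigits s.toList.reverse with
      | nil => rfl
      | cons c rest => rfl
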